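-- pv_equiv track=rewrite | github.com/edizucar/adversarially-training-transformers | src/utils.py | odd_quotes_in_tokens
-- ===== SOURCE A (Python) =====
-- def odd_quotes_in_tokens(tokens):
--     """Find examples with an odd number of quotation marks."""
--     TOKENS_WITH_QUOTES = {
--         1: 1,366: 1, 526: 1, 553: 1, 1298: 1, 1600: 1, 1701: 1, 1911: 1, 2404: 2, 2430: 2, 2474: 1, 2625: 1, 4895: 1, 4943: 1, 5320: 1, 5855: 1, 7203: 1, 7879: 1, 8172: 1, 8351: 2, 8762: 1,
--         8973: 1, 9063: 1, 9313: 1, 9962: 1, 11074: 1, 11097: 1, 11496: 1, 11919: 2, 12340: 1, 12813: 1, 12878: 1, 13018: 2, 13538: 2, 13984: 1, 14631: 1, 14692: 1, 15327: 1, 15341: 1, 15473: 2,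
--         15931: 2, 16078: 1, 16725: 1, 17241: 1, 17553: 1, 17912: 1, 17971: 1, 18109: 1, 18161: 1, 19056: 1, 19570: 1, 19779: 1, 19990: 1, 20598: 1, 20662: 1, 21215: 1, 21387: 1, 22039: 1, 22135: 1,
--         23785: 1, 23984: 1, 24018: 1, 24426: 1, 24618: 1, 25113: 1, 25698: 1, 25719: 1, 26033: 1, 26214: 1, 26358: 2, 26700: 1, 26793: 1, 26989: 1, 27071: 1, 27267: 1, 27444: 1, 27896: 1, 29225: 1,
--         29368: 1, 29653: 1, 30478: 1, 30487: 1, 30543: 1, 30629: 1, 30823: 1, 30827: 1, 30866: 1, 32047: 1, 32203: 2, 32509: 2, 33116: 1, 33151: 2, 33172: 1, 33283: 1, 33490: 1, 34171: 2, 34607: 1,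
--         34713: 4, 35379: 1, 35713: 1, 35922: 1, 36521: 1, 36786: 1, 37082: 1, 37160: 1, 37227: 3, 37811: 3, 38214: 1, 39658: 1, 40264: 1, 40484: 1, 40754: 1, 41424: 2, 42501: 1, 42720: 1, 42785: 2,
--         42911: 1, 42924: 1, 43634: 1, 43825: 1, 44212: 1, 44388: 1, 45144: 1, 45434: 1, 46385: 1, 47182: 4, 48219: 1, 48220: 1, 48774: 1, 49296: 1, 50248: 1
--     }
--     quote_count = sum(TOKENS_WITH_QUOTES.get(token, 0) for token in tokens)
--     if quote_count % 2 != 0: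
--         return True
--     return False
-- ===== SOURCE B (Python) =====
-- # Divide-and-conquer: the answer for a list is the XOR of the answers for its
-- # two halves; only tokens with an odd quote count (weight 1 or 3 in A's table)
-- # can affect the parity, so a singleton reduces to membership in that set.
-- ODD_QUOTE_TOKENS = frozenset({
--     1, 366, 526, 553, 1298, 1600, 1701, 1911, 2474, 2625, 4895, 4943, 5320,
--     5855, 7203, 7879, 8172, 8762, 8973, 9063, 9313, 9962, 11074, 11097, 11496,
--     12340, 12813, 12878, 13984, 14631, 14692, 15327, 15341, 16078, 16725,
--     17241, 17553, 17912, 17971, 18109, 18161, 19056, 19570, 19779, 19990,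
--     20598, 20662, 21215, 21387, 22039, 22135, 23785, 23984, 24018, 24426,
--     24618, 25113, 25698, 25719, 26033, 26214, 26700, 26793, 26989, 27071,
--     27267, 27444, 27896, 29225, 29368, 29653, 30478, 30487, 30543, 30629,
--     30823, 30827, 30866, 32047, 33116, 33172, 33283, 33490, 34607, 35379,
--     35713, 35922, 36521, 36786, 37082, 37160, 37227, 37811, 38214, 39658,
--     40264, 40484, 40754, 42501, 42720, 42911, 42924, 43634, 43825, 44212,
--     44388, 45144, 45434, 46385, 48219, 48220, 48774, 49296, 50248
-- })
--
-- def odd_quotes_in_tokens(tokens):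
--     """Find examples with an odd number of quotation marks."""
--     n = len(tokens)
--     if n == 0:
--         return False
--     if n == 1:
--         return tokens[0] in ODD_QUOTE_TOKENS
--     mid = n // 2
--     return odd_quotes_in_tokens(tokens[:mid]) != odd_quotes_in_tokens(tokens[mid:])
-- ===== Notes on version B (the rewrite author's own statement) =====
-- stated objective: alternative
-- what changed: Replaces A's single-pass weighted sum plus mod-2 test by a divide-and-conquer recursion: split the list in half, recurse, and XOR the halves' answers, with a singleton base case of membership in the precomputed odd-weight token set (even-weight table entries are discarded).
import Mathlib
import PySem

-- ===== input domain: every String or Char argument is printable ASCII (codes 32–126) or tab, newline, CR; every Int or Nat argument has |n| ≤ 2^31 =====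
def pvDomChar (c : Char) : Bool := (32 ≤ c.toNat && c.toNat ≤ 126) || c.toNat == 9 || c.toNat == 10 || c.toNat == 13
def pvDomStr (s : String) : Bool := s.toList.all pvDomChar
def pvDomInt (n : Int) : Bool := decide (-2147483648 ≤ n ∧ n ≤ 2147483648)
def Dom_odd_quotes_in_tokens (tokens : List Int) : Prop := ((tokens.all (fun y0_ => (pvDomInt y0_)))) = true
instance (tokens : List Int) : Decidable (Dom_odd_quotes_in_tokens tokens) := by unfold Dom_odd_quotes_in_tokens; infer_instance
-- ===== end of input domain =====

-- B replaces A's single-pass weighted sum + mod-2 test by a divide-and-conquer recursion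
-- XORing the answers for the two halves, with a membership base case (alternative decomposition).

-- ===== PORT A =====
def pvQuotePairs : List (Int × Int) := [(1, 1), (366, 1), (526, 1), (553, 1), (1298, 1), (1600, 1), (1701, 1), (1911, 1), (2404, 2), (2430, 2), (2474, 1), (2625, 1), (4895, 1), (4943, 1), (5320, 1), (5855, 1), (7203, 1), (7879, 1), (8172, 1), (8351, 2), (8762, 1), (8973, 1), (9063, 1), (9313, 1), (9962, 1), (11074, 1), (11097, 1), (11496, 1), (11919, 2), (12340, 1), (12813, 1), (12878, 1), (13018, 2), (13538, 2), (13984, 1), (14631, 1), (14692, 1), (15327, 1), (15341, 1), (15473, 2), (15931, 2), (16078, 1), (16725, 1), (17241, 1), (17553, 1), (17912, 1), (17971, 1), (18109, 1), (18161, 1), (19056, 1), (19570, 1), (19779, 1), (19990, 1), (20598, 1), (20662, 1), (21215, 1), (21387, 1), (22039, 1), (22135, 1), (23785, 1), (23984, 1), (24018, 1), (24426, 1), (24618, 1), (25113, 1), (25698, 1), (25719, 1), (26033, 1), (26214, 1), (26358, 2), (26700, 1), (26793, 1), (26989, 1), (27071, 1), (27267, 1), (27444, 1), (27896, 1), (29225,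 1), (29368, 1), (29653, 1), (30478, 1), (30487, 1), (30543, 1), (30629, 1), (30823, 1), (30827, 1), (30866, 1), (32047, 1), (32203, 2), (32509, 2), (33116, 1), (33151, 2), (33172, 1), (33283, 1), (33490, 1), (34171, 2), (34607, 1), (34713, 4), (35379, 1), (35713, 1), (35922, 1), (36521, 1), (36786, 1), (37082, 1), (37160, 1), (37227, 3), (37811, 3), (38214, 1), (39658, 1), (40264, 1), (40484, 1), (40754, 1), (41424, 2), (42501, 1), (42720, 1), (42785, 2), (42911, 1), (42924, 1), (43634, 1), (43825, 1), (44212, 1), (44388, 1), (45144, 1), (45434, 1), (46385, 1), (47182, 4), (48219, 1), (48220, 1), (48774, 1), (49296, 1), (50248, 1)]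

def odd_quotes_in_tokens (tokens : List Int) : Bool :=
  let d : PySem.Dict Int Int := PySem.Dict.ofList pvQuotePairs
  let quote_count : Int := tokens.foldl (fun acc token => acc + d.getD token 0) 0
  if PySem.Int.mod quote_count 2 ≠ 0 then true else false

-- ===== PORT B =====
def pvOddQuoteTokens : PySem.Set Int := [1, 366, 526, 553, 1298, 1600, 1701, 1911, 2474, 2625, 4895, 4943, 5320, 5855, 7203, 7879, 8172, 8762, 8973, 9063, 9313, 9962, 11074, 11097, 11496, 12340, 12813, 12878, 13984, 14631, 14692, 15327, 15341, 16078, 16725, 17241, 17553, 17912, 17971, 18109, 18161, 19056, 19570, 19779, 19990, 20598, 20662, 21215, 21387, 22039, 22135, 23785, 23984, 24018, 24426, 24618, 25113, 25698, 25719, 26033, 26214, 26700, 26793, 26989, 27071, 27267, 27444, 27896, 29225, 29368, 29653, 30478, 30487, 30543, 30629, 30823, 30827, 30866, 32047, 33116, 33172, 33283, 33490, 34607, 35379, 35713, 35922, 36521, 36786, 37082, 37160, 37227, 37811, 38214, 39658, 40264, 40484, 40754, 42501, 42720, 42911, 42924, 43634, 43825, 44212, 44388, 45144, 45434, 46385,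 48219, 48220, 48774, 49296, 50248]

-- tokens[:mid] / tokens[mid:] with 0 ≤ mid ≤ n are exactly take/drop; tokens[0] on a singleton is its head.
def odd_quotes_in_tokens_alt : List Int → Bool
  | [] => false
  | [t] => pvOddQuoteTokens.contains t
  | a :: b :: rest =>
    let tokens := a :: b :: rest
    let mid := tokens.length / 2
    xor (odd_quotes_in_tokens_alt (tokens.take mid)) (odd_quotes_in_tokens_alt (tokens.drop mid))
termination_by tokens => tokens.length
decreasing_by
  · simp only [List.length_take, List.length_cons]; omega
  · simp only [List.length_drop, List.length_cons]; omega

-- ===== PRECONDITION & SPEC =====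
def Spec_odd_quotes_in_tokens (tokens : List Int) (out : Bool) : Prop := out = odd_quotes_in_tokens_alt tokens
instance (tokens : List Int) (out : Bool) : Decidable (Spec_odd_quotes_in_tokens tokens out) := by unfold Spec_odd_quotes_in_tokens; infer_instance

-- ===== CLAIM (what is proved, stated in full; the proofs are below) =====
def Claim_equal_odd_quotes_in_tokens : Prop := ∀ (tokens : List Int), Dom_odd_quotes_in_tokens tokens → Spec_odd_quotes_in_tokens tokens (odd_quotes_in_tokens tokens)

-- ===== LEMMAS AND PROOFS =====

theorem pv_mod_two (a : Int) : PySem.Int.mod a 2 = a % 2 := by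
  simp [PySem.Int.mod, Int.fmod_eq_emod]

-- A's dict literal has pairwise-distinct keys, so building it by insertion keeps the pair list as written.
set_option maxRecDepth 40000 in
theorem pv_ofList_pairs : PySem.Dict.ofList pvQuotePairs = PySem.Dict.mk pvQuotePairs := by
  decide

set_option maxRecDepth 40000 in
theorem pv_keys_nodup : (pvQuotePairs.map Prod.fst).Nodup := by
  decide

-- B's odd-token set is exactly the keys of the odd-weight entries of A's table.
set_option maxRecDepth 40000 in
theorem pv_odd_filter :
    pvOddQuoteTokens = (pvQuotePairs.filter (fun p => p.2 % 2 == 1)).map Prod.fst := by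
  decide

-- Pointwise: membership in the odd-weight key list decides the parity of the looked-up weight.
theorem pv_contains_parity (l : List (Int × Int)) (hn : (l.map Prod.fst).Nodup) (t : Int) :
    ((l.filter (fun p => p.2 % 2 == 1)).map Prod.fst).contains t
      = decide (((PySem.Dict.mk l).getD t 0) % 2 ≠ 0) := by
  induction l with
  | nil => rfl
  | cons kv rest ih =>
    obtain ⟨k, v⟩ := kv
    simp only [List.map_cons, List.nodup_cons] at hn
    have hget : (PySem.Dict.mk ((k, v) :: rest)).getD t 0
        = if k == t then v else (PySem.Dict.mk rest).getD t 0 := by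
      rw [PySem.Dict.getD_eq_get?_getD, PySem.Dict.get?_mk_cons]
      by_cases h : k == t <;> simp [h, PySem.Dict.getD_eq_get?_getD]
    by_cases hk : k = t
    · subst hk
      have hg : (PySem.Dict.mk ((k, v) :: rest)).getD k 0 = v := by simp [hget]
      have hnot : ((rest.filter (fun p => p.2 % 2 == 1)).map Prod.fst).contains k = false := by
        simp only [List.contains_iff_mem, Bool.eq_false_iff, ne_eq]
        intro hmem
        rw [List.mem_map] at hmem
        obtain ⟨p, hp, hpk⟩ := hmem
        exact hn.1 (hpk ▸ List.mem_map_of_mem (List.mem_of_mem_filter hp))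
      by_cases hv : (v % 2 == 1) = true
      · have hv' : v % 2 ≠ 0 := by simp only [beq_iff_eq] at hv; omega
        simp only [List.filter_cons, hv, if_true, List.map_cons, List.contains_cons, beq_self_eq_true,
          Bool.true_or, hg]
        simp [hv']
      · have hv' : ¬ v % 2 ≠ 0 := by simp only [beq_iff_eq] at hv; omega
        rw [Bool.not_eq_true] at hv
        simp only [List.filter_cons, hv, Bool.false_eq_true, if_false, hg]
        rw [hnot]
        symm
        simp [hv']
    · have hkt : (k == t) = false := by simp [hk]
      have hg : (PySem.Dict.mk ((k, v) :: rest)).getD t 0 = (PySem.Dict.mk rest).getD t 0 := by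
        simp [hget, hkt]
      rw [hg]
      by_cases hv : (v % 2 == 1) = true
      · have htk : (t == k) = false := by simp; omega
        simp only [List.filter_cons, hv, if_true, List.map_cons, List.contains_cons, htk,
          Bool.false_or, ih hn.2]
      · rw [Bool.not_eq_true] at hv
        simp only [List.filter_cons, hv, Bool.false_eq_true, if_false]
        exact ih hn.2

theorem pv_contains_getD (t : Int) :
    pvOddQuoteTokens.contains t
      = decide (((PySem.Dict.ofList pvQuotePairs).getD t 0) % 2 ≠ 0) := by
  rw [pv_ofList_pairs, pv_odd_filter]
  exact pv_contains_parity pvQuotePairs pv_keys_nodup t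

-- The reference parity: oddness of the number of odd-weight tokens in the list.
def pvParityCount (l : List Int) : Bool :=
  decide ((l.countP (fun t => pvOddQuoteTokens.contains t)) % 2 = 1)

theorem pv_parityCount_append (l r : List Int) :
    pvParityCount (l ++ r) = xor (pvParityCount l) (pvParityCount r) := by
  simp only [pvParityCount, List.countP_append]
  generalize l.countP (fun t => pvOddQuoteTokens.contains t) = x
  generalize r.countP (fun t => pvOddQuoteTokens.contains t) = y
  rcases Nat.mod_two_eq_zero_or_one x with h | h <;>
    rcases Nat.mod_two_eq_zero_or_one y with h2 | h2 <;>
    simp [Nat.add_mod, h, h2]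

-- B's divide-and-conquer computes pvParityCount (strong induction along B's own recursion).
theorem pv_alt_eq_parityCount (l : List Int) :
    odd_quotes_in_tokens_alt l = pvParityCount l := by
  fun_induction odd_quotes_in_tokens_alt l
  case case1 => simp [pvParityCount]
  case case2 t =>
    simp only [pvParityCount, List.countP_cons, List.countP_nil]
    by_cases h : t ∈ pvOddQuoteTokens <;> simp [h]
  case case3 a b rest ih1 ih2 =>
    rw [ih1, ih2, ← pv_parityCount_append, List.take_append_drop]

-- A's running sum tracks the same parity.
theorem pv_fold_parity (ts : List Int) : ∀ (acc : Int),
    decide ((ts.foldl (fun acc token => acc + (PySem.Dict.ofList pvQuotePairs).getD token 0) acc) % 2 ≠ 0)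
      = xor (decide (acc % 2 ≠ 0)) (pvParityCount ts) := by
  induction ts with
  | nil => intro acc; simp [pvParityCount]
  | cons t ts ih =>
    intro acc
    rw [List.foldl_cons, ih (acc + (PySem.Dict.ofList pvQuotePairs).getD t 0)]
    have hc := pv_contains_getD t
    simp only [pvParityCount, List.countP_cons, hc]
    generalize (PySem.Dict.ofList pvQuotePairs).getD t 0 = v at *
    generalize ts.countP (fun t => pvOddQuoteTokens.contains t) = n
    by_cases h : v % 2 = 0 <;> by_cases ha : acc % 2 = 0 <;>
      rcases Nat.mod_two_eq_zero_or_one n with hn | hn <;>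
      simp [h, ha, hn, Nat.add_mod] <;> omega

-- ===== VERDICT (by name: the statement is the Claim_ definition above) =====
theorem odd_quotes_in_tokens_spec : Claim_equal_odd_quotes_in_tokens := by
  intro tokens _
  unfold Spec_odd_quotes_in_tokens
  simp only [odd_quotes_in_tokens]
  rw [pv_alt_eq_parityCount, pv_mod_two]
  have h := pv_fold_parity tokens 0
  simp only [show ((0:Int) % 2 ≠ 0) = False by simp, decide_false, Bool.false_xor] at h
  by_cases hb : pvParityCount tokens <;> simp [hb] at h ⊢ <;> simp [h]
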